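/- GENERATED by tools/from_farm_form.py from prooffarm-gif/accepted/gif_decode.E/Proof.lean (a worked proof of the farm's unit `gif_decode.E`,
   accepted by the verdict) — do not edit. -/
import Gif.Spec.Units.gif_decode_E
import Gif.Spec.AllSegs

open X86 X86.User Asan ProgX.Base ProgX.Base.Spec Gif.Spec

set_option maxRecDepth 4000
set_option maxHeartbeats 4000000

/-!
  `gif_decode.E` (0x10afdb … the `ret` at 0x10afff, 9 instructions; gif_driver.c:180 / 227): THE EPILOGUE OF THE DRIVER'S PROTECTED
  FRAME, at HEAP LEVEL (no forest, no `Env`): the two stores that clear the frame's 12 shadow bytes, `add rsp, 96`, five pops, `ret`.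
  The recipe is farm.gif/hints/protected_frame.md "THE EPILOGUE", with `HeapInv.epilogue_ra` in place of `after_epilogue` (no `GifOK`
  here) and a two-heap form of `epilogue_same` (the heap of `Done` is `Hc`, the entry's is `H`).
-/

namespace Gif.Spec.gif_decode_E

/-- **`epilogue_same` (Gif/Spec/FrameCarry.lean §4) FOR TWO HEAPS**: the frame's shadow span leaves the footprint. The tree's lemma
asks the entry's invariant and the invariant before the epilogue for the SAME heap; `gif_decode.Done` has the present heap `Hc`
(`SameRegion H Hc` only). The proof reads nothing of either heap: only the stack halves of the two invariants (`StackOK.clean` at the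
entry, the own frame's `FramePoisoned` before the epilogue). -/
theorem gdE_epilogue_same {H0 H1 : Heap} {rest : List Obj} {frames : List (Nat × FrameLayout)} {top top' ro ro' : Nat}
    {m0 m1 : Mem} {Fl : FrameLayout} {w : Span} {ws : List Span} (hro : Fl.raOff = ro) (hro' : Fl.raOff - Fl.size = ro')
    (hinv0 : HeapInv H0 rest frames (top + 8) m0) (hinv1 : HeapInv H1 rest ((top - ro, Fl) :: frames) top' m1)
    (hra : top % 8 = 0)
    (hsame : Mem.SameExcept (w :: shadowSpan (top - ro) (top - ro') :: ws) m0 m1) :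
    Mem.SameExcept (w :: ws) m0 (storesMem m1 ((top - ro) / 8) Fl.epilogue) := by
  subst hro
  subst hro'
  have hact := hinv1.shadow.stack.active (top - Fl.raOff, Fl) List.mem_cons_self
  simp only at hact
  obtain ⟨hF, hb8, hb1, hb2, hp⟩ := hact
  have hlo := hinv1.shadow.stack.lo
  have hc1 := FrameLayout.epilogue_clean hF hb8 hb2 hp
  have hc0 := hinv0.shadow.stack.clean
  obtain ⟨hs8, _, hein, _, _, _, _, _, hr8, hrs⟩ := hF
  have hg : (top - Fl.raOff) / 8 + Fl.size / 8 ≤ 0x200000 := by omega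
  have h2 := storesMem_sameExcept m1 ((top - Fl.raOff) / 8) (Fl.size / 8) Fl.epilogue hein hg
  intro a ha
  by_cases hin : 0xC00000 + (top - Fl.raOff) / 8 ≤ a.toNat ∧ a.toNat < 0xC00000 + (top - Fl.raOff) / 8 + Fl.size / 8
  · -- a shadow byte of the frame: 0 in both memories
    have ea : a = shadowAddr (a.toNat - 0xC00000) := eq_shadowAddr a _ (by omega)
    have z1 := hc1 (a.toNat - 0xC00000) (by omega) (by omega)
    have z0 := hc0 (a.toNat - 0xC00000) (by omega) (by omega)
    unfold shadowOf at z1 z0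
    rw [← ea] at z1 z0
    apply UInt8.toNat_inj.mp
    rw [z1, z0]
  · -- any other byte: neither the epilogue's stores nor the function wrote it
    have e2 : (storesMem m1 ((top - Fl.raOff) / 8) Fl.epilogue).read a = m1.read a := by
      apply h2 a
      intro x hx
      have hx_eq := List.mem_singleton.mp hx
      rw [hx_eq]
      simp only
      omega
    rw [e2]
    apply hsame a
    intro x hx
    rcases List.mem_cons.mp hx with hx_eq | hx'
    · rw [hx_eq]
      exact ha w List.mem_cons_self
    · rcases List.mem_cons.mp hx' with hx_eq | hx''
      · rw [hx_eq]
        unfold shadowSpan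
        simp only
        omega
      · exact ha x (List.mem_cons_of_mem _ hx'')

end Gif.Spec.gif_decode_E

/-- The epilogue of `gif_decode` takes `Done` at 0x10afdb to the contract's `Returned`. -/
theorem Gif.Spec.Proved.gif_decode_E_ok : Gif.Spec.gif_decode_E.Statement := by
  intro Lay hLay μ hμ u₀ hcode H rest frames Hc e ret v hat
  -- 1. THE PRELUDE: the entry assertion `Done` = `Core` (kept whole: its `>>> 3` field stays out of the walk) + the present heap
  obtain ⟨hcore, hreg, hinv⟩ := hat
  have he := hcore.entry
  v_entry he
  have hpre := hcore.pre
  obtain ⟨hheap, hglob, hconsts0, hin, hrep, hrep_lo, hrep_hi⟩ := hcore.pre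
  -- what the walker reads of the segment's entry state: rip, rsp (as `c_rsp`), the registers kept, the text, DF / MXCSR
  have w_rip := hcore.rip
  have c_rsp : v.reg .rsp = e.reg .rsp - 136 := hcore.rsp
  have w_kept : RegsKept [.rsp] v v := RegsKept.refl _ _
  have w_eq : Mem.EqOn ProgX.Base.L.textLo ProgX.Base.L.textHi u₀.mem v.mem := ProgX.Base.conv_code_eqOn hcore.code
  have hdf := (show abiInv _ from hcore.abi).1
  have hmx := (show abiInv _ from hcore.abi).2
  have hsse := ProgX.Base.sseOK_of_abiInv hcore.abi
  -- the slots the five pops (10AFF7H … 10AFFDH) and the `ret` (10AFFFH) read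
  have k_r14 : v.mem.readLE (e.reg .rsp - 8) 8 = (e.reg .r14).toNat := hcore.slot_r14
  have k_r13 : v.mem.readLE (e.reg .rsp - 16) 8 = (e.reg .r13).toNat := hcore.slot_r13
  have k_r12 : v.mem.readLE (e.reg .rsp - 24) 8 = (e.reg .r12).toNat := hcore.slot_r12
  have k_rbp : v.mem.readLE (e.reg .rsp - 32) 8 = (e.reg .rbp).toNat := hcore.slot_rbp
  have k_rbx : v.mem.readLE (e.reg .rsp - 40) 8 = (e.reg .rbx).toNat := hcore.slot_rbx
  have k_ra : UInt64.ofNat (v.mem.readLE (e.reg .rsp) 8) = ret := hcore.slot_ra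
  -- THE SHADOW INDEX REGISTER `r12` AS A VARIABLE `b` WITH BOUNDS: no `>>> 3` is in the walk's context
  have e136 : (e.reg .rsp - 136).toNat = (e.reg .rsp).toNat - 136 := by u_omega
  obtain ⟨b, hb⟩ : ∃ b : Word, b = (e.reg .rsp - 136) >>> 3 := ⟨_, rfl⟩
  have hbn : b.toNat = ((e.reg .rsp).toNat - 136) / 8 := by
    rw [hb, Asan.toNat_shr3, e136]
  have hb1 : 0xE0000 ≤ b.toNat := by omega
  have hb2 : b.toNat + 12 ≤ 0x100000 := by omega
  have c_r12 : v.reg .r12 = b := by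
    rw [hb]
    exact hcore.r12
  clear hb
  -- 2. THE WALK from 10AFDBH (gif_driver.c:180, the two shadow stores) over the `ret` (gif_driver.c:227): no side goal is left
  u_walk hcode [hμ.vendor] span [ProgX.Base.L.textLo, ProgX.Base.L.textHi] side (v_side)
  -- 3. THE EPILOGUE'S TWO STORES AS THE LAYOUT'S `storesMem`
  have hepi : Gif.Frames.gif_decode.epilogue = [⟨0, 8, 0⟩, ⟨8, 4, 0⟩] := rfl
  have hmem : s_10afff.mem = storesMem v.mem (((e.reg .rsp).toNat - 136) / 8) Gif.Frames.gif_decode.epilogue := by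
    rw [hepi, w_mem, ← hbn]
    exact stores2_index v.mem b 12582912 12582920 0 8 0 8 4 0 (by omega) (by decide) (by decide) (by decide) (by decide)
  have hin12 : ∀ s, s ∈ Gif.Frames.gif_decode.epilogue → s.idx + s.width ≤ 12 := by decide
  clear w_mem
  -- 4. THE HEAP'S INVARIANT behind the epilogue: the callers' frames, the clean stack ends above the return address
  have hinv2 : HeapInv Hc rest frames ((e.reg .rsp).toNat + 8)
      (storesMem v.mem (((e.reg .rsp).toNat - 136) / 8) Gif.Frames.gif_decode.epilogue) :=
    HeapInv.epilogue_ra (F := Gif.Frames.gif_decode) hinv he_align he_top hheap.inv.frames_above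
  -- the constants: the stores go to the shadow
  have hse := storesMem_sameExcept v.mem (((e.reg .rsp).toNat - 136) / 8) 12 Gif.Frames.gif_decode.epilogue hin12 (by omega)
  have hconsts2 : Consts (storesMem v.mem (((e.reg .rsp).toNat - 136) / 8) Gif.Frames.gif_decode.epilogue) := by
    apply hcore.consts.sameExcept hse
    intro w hw
    have hw_eq := List.mem_singleton.mp hw
    rw [hw_eq]
    right
    simp only
    omega
  -- the frame's shadow span leaves the footprint
  have hsame2 := Gif.Spec.gif_decode_E.gdE_epilogue_same (top := (e.reg .rsp).toNat) (ro := 136) (ro' := 40)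
    (Fl := Gif.Frames.gif_decode) rfl rfl hheap.inv hinv he_align hcore.same
  rw [← hmem] at hinv2 hconsts2 hsame2
  -- 5. `Returned`, field by field
  refine ReachVia.done ?_
  refine X86.User.Returned.mk w_rip w_rsp ?saved ?same (ProgX.Base.conv_code_in w_eq) ?abi ?post
  case saved =>
    -- the popped registers are the walker's facts; `r15` was never touched
    intro r hr
    cases r <;> first
      | exact absurd hr (by decide)
      | (with_reducible assumption)
      | exact (w_kept _ rfl).trans hcore.r15
  case same =>
    simp only [X86.User.Spec.footprint, vspec]
    exact hsame2
  case abi =>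
    -- DF and MXCSR by hand (`v_inv` is slow behind a walk with shadow stores)
    refine ProgX.Base.abiInv_of ?_ ?_
    · rw [w_flags]
      simp only [X86.User.df_setStatus]
      exact hdf
    · rw [w_mxcsr]
      exact hmx
  case post =>
    -- the final heap is at the place of the entry's, its invariant for the callers' frames, the constants
    exact ⟨Hc, hreg, hinv2, hconsts2⟩
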